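-- pv_equiv track=rewrite | github.com/MrFlick/advent-of-code | 2023/py/2023-Day03-Gears.py | annotate_grid
-- ===== SOURCE A (Python) =====
-- def annotate_grid(grid):
--     annotated = []
--     numbers = []
--     symbols = []
--     for r, row in enumerate(grid):
--         arow = []
--         cnum = ""
--         for c, col in enumerate(row + ['.']):
--             if col.isdigit():
--                 cnum += col
--                 arow.append(len(numbers))
--             else:
--                 if cnum:
--                     arow.append(-1)
--                     numbers.append(int(cnum))
--                     cnum = ""
--                 else:
--                     arow.append(-1)
--                 if col != ".":
--                     symbols.append((r, c))
--         annotated.append(arow)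
--     return annotated, numbers, symbols
-- ===== SOURCE B (Python) =====
-- def annotate_grid(grid):
--     annotated, numbers, symbols = [], [], []
--     for r, row in enumerate(grid):
--         arow = []
--         i, n = 0, len(row)
--         while i < n:
--             j = i
--             if row[i].isdigit():
--                 while j < n and row[j].isdigit():
--                     j += 1
--                 arow.extend([len(numbers)] * (j - i))
--                 numbers.append(int(''.join(row[i:j])))
--             else:
--                 while j < n and not row[j].isdigit():
--                     j += 1
--                 arow.extend([-1] * (j - i))
--                 for k in range(i, j):
--                     if row[k] != '.':
--                         symbols.append((r, k))
--             i = j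
--         arow.append(-1)  # the sentinel column
--         annotated.append(arow)
--     return annotated, numbers, symbols
-- ===== Notes on version B (the rewrite author's own statement) =====
-- stated objective: alternative
-- what changed: B replaces A's per-cell state machine (sentinel '.' column and a carried cnum accumulator flushed on run ends) with a two-pointer run decomposition: each row is split into maximal digit / non-digit runs, a digit run contributes a replicated index block and one int(''.join(run)), a non-digit run a replicated -1 block and its symbols, with one trailing -1 per row.
import Mathlib
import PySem

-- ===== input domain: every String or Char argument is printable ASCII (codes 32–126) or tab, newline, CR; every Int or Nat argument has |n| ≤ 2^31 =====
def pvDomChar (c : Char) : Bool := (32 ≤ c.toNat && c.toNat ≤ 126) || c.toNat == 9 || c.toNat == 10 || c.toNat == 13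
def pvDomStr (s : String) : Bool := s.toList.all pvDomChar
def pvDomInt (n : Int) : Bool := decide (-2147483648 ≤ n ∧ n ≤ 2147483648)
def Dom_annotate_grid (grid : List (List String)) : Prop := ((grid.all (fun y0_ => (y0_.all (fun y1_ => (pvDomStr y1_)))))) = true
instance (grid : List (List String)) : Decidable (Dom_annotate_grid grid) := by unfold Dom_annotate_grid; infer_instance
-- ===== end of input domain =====

-- B rebuilds each row from maximal digit/non-digit runs (two-pointer scan) instead of A's per-cell sentinel state machine; same O(n) cost, different decomposition.


-- ===== PORT A =====
-- Port of A: the row loop, and the cell loop over row + ['.'] carrying the pending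
-- digit accumulator cnum (kept as List Char; int(cnum) = PySem.Int.ofChars?, always
-- `some` since cnum is a nonempty all-digit string whenever it is flushed).
def aLoop (r : Int) (cells : List String) (c : Int) (arow : List Int)
    (cnum : List Char) (ns : List Int) (syms : List (Int × Int)) :
    List Int × List Int × List (Int × Int) :=
  match cells with
  | [] => (arow, ns, syms)
  | col :: rest =>
    if PySem.Str.strIsdigit col then
      aLoop r rest (c + 1) (arow ++ [(ns.length : Int)]) (cnum ++ col.toList) ns syms
    else
      let ns' := if cnum ≠ [] then ns ++ [(PySem.Int.ofChars? cnum).getD 0] else ns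
      let syms' := if col ≠ "." then syms ++ [(r, c)] else syms
      aLoop r rest (c + 1) (arow ++ [-1]) [] ns' syms'

def aRows (r : Int) (rows : List (List String)) (ann : List (List Int))
    (ns : List Int) (syms : List (Int × Int)) :
    List (List Int) × List Int × List (Int × Int) :=
  match rows with
  | [] => (ann, ns, syms)
  | row :: rest =>
    let (arow, ns', syms') := aLoop r (row ++ ["."]) 0 [] [] ns syms
    aRows (r + 1) rest (ann ++ [arow]) ns' syms'

def annotate_grid (grid : List (List String)) : List (List Int) × List Int × (List (Int × Int)) :=
  aRows 0 grid [] [] []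

-- ===== PORT B =====
-- Port of B: each row is consumed one maximal run at a time (the j-scan of Source B is
-- takeWhile/dropWhile); a digit run contributes a replicate block and one number via
-- ''.join (PySem.Str.join), a non-digit run a replicate block and its symbols.
def bSyms (r : Int) (c : Int) (run : List String) : List (Int × Int) :=
  match run with
  | [] => []
  | x :: t => (if x ≠ "." then [(r, c)] else []) ++ bSyms r (c + 1) t

def bLoop (r : Int) (cells : List String) (c : Int) (arow : List Int)
    (ns : List Int) (syms : List (Int × Int)) :
    List Int × List Int × List (Int × Int) :=
  match h : cells with
  | [] => (arow ++ [-1], ns, syms)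
  | x :: t =>
    if hx : PySem.Str.strIsdigit x then
      let run := cells.takeWhile (fun y => PySem.Str.strIsdigit y)
      let rest := cells.dropWhile (fun y => PySem.Str.strIsdigit y)
      bLoop r rest (c + run.length) (arow ++ List.replicate run.length (ns.length : Int))
        (ns ++ [(PySem.Int.ofStr? (PySem.Str.join "" run)).getD 0]) syms
    else
      let run := cells.takeWhile (fun y => !PySem.Str.strIsdigit y)
      let rest := cells.dropWhile (fun y => !PySem.Str.strIsdigit y)
      bLoop r rest (c + run.length) (arow ++ List.replicate run.length (-1)) ns
        (syms ++ bSyms r c run)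
  termination_by cells.length
  decreasing_by
  · simp only [h, List.dropWhile_cons, hx]
    exact Nat.lt_succ_of_le (List.length_dropWhile_le _ t)
  · simp only [h, List.dropWhile_cons, hx]
    simp only [Bool.not_eq_true] at hx
    simp only [Bool.not_false, if_true]
    exact Nat.lt_succ_of_le (List.length_dropWhile_le _ t)

def bRows (r : Int) (rows : List (List String)) (ann : List (List Int))
    (ns : List Int) (syms : List (Int × Int)) :
    List (List Int) × List Int × List (Int × Int) :=
  match rows with
  | [] => (ann, ns, syms)
  | row :: rest =>
    let (arow, ns', syms') := bLoop r row 0 [] ns syms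
    bRows (r + 1) rest (ann ++ [arow]) ns' syms'

def annotate_grid_alt (grid : List (List String)) : List (List Int) × List Int × (List (Int × Int)) :=
  bRows 0 grid [] [] []

-- ===== PRECONDITION & SPEC =====
def Spec_annotate_grid (grid : List (List String)) (out : List (List Int) × List Int × (List (Int × Int))) : Prop := out = annotate_grid_alt grid
instance (grid : List (List String)) (out : List (List Int) × List Int × (List (Int × Int))) : Decidable (Spec_annotate_grid grid out) := by unfold Spec_annotate_grid; infer_instance

-- ===== CLAIM (what is proved, stated in full; the proofs are below) =====
def Claim_equal_annotate_grid : Prop := ∀ (grid : List (List String)), Dom_annotate_grid grid → Spec_annotate_grid grid (annotate_grid grid)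

-- ===== LEMMAS AND PROOFS =====

theorem join_nil_eq_flatten (ls : List (List Char)) : PySem.Chars.join [] ls = ls.flatten := by
  induction ls with
  | nil => rfl
  | cons x t ih =>
    cases t with
    | nil => simp [PySem.Chars.join, List.intercalate]
    | cons y t' =>
      simp only [PySem.Chars.join, List.intercalate] at ih ⊢
      simp [List.intersperse, List.flatten] at ih ⊢
      exact ih

theorem head_dropWhile_false {α : Type} (p : α → Bool) (l : List α) {z : α} {t : List α}
    (h : l.dropWhile p = z :: t) : p z = false := by
  induction l with
  | nil => simp at h
  | cons x xs ih =>
    by_cases hx : p x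
    · simp [hx] at h; exact ih h
    · simp [hx] at h
      simp [← h.1]; exact Bool.not_eq_true _ ▸ hx

theorem strIsdigit_toList_ne_nil {s : String} (h : PySem.Str.strIsdigit s = true) :
    s.toList ≠ [] := by
  intro hnil
  rw [PySem.Str.strIsdigit_eq, hnil] at h
  exact absurd h (by decide)

-- A over a maximal digit run: the pending accumulator collects the run's characters.
theorem aLoop_digit_run (run : List String) (hrun : ∀ x ∈ run, PySem.Str.strIsdigit x = true) :
    ∀ (tail : List String) (r c : Int) (arow : List Int) (cnum : List Char)
      (ns : List Int) (syms : List (Int × Int)),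
    aLoop r (run ++ tail) c arow cnum ns syms =
      aLoop r tail (c + run.length)
        (arow ++ List.replicate run.length (ns.length : Int))
        (cnum ++ (run.map String.toList).flatten) ns syms := by
  induction run with
  | nil => intro tail r c arow cnum ns syms; simp
  | cons x t ih =>
    intro tail r c arow cnum ns syms
    have hx := hrun x (by simp)
    rw [List.cons_append, aLoop, if_pos hx,
        ih (fun y hy => hrun y (by simp [hy]))]
    congr 1
    · simp only [List.length_cons]; push_cast; ring
    · simp [List.replicate_succ, List.append_assoc]
    · simp

-- A over a maximal non-digit run with empty accumulator: only -1s and symbols.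
theorem aLoop_nondigit_run (run : List String) (hrun : ∀ x ∈ run, PySem.Str.strIsdigit x = false) :
    ∀ (tail : List String) (r c : Int) (arow : List Int)
      (ns : List Int) (syms : List (Int × Int)),
    aLoop r (run ++ tail) c arow [] ns syms =
      aLoop r tail (c + run.length)
        (arow ++ List.replicate run.length (-1)) [] ns (syms ++ bSyms r c run) := by
  induction run with
  | nil => intro tail r c arow ns syms; simp [bSyms]
  | cons x t ih =>
    intro tail r c arow ns syms
    have hx := hrun x (by simp)
    rw [List.cons_append, aLoop, if_neg (by rw [hx]; simp),
        ih (fun y hy => hrun y (by simp [hy]))]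
    simp only [bSyms]
    congr 1
    · simp only [List.length_cons]; push_cast; ring
    · simp [List.replicate_succ, List.append_assoc]
    · split_ifs <;> simp

-- Flushing: when the next cell is not a digit, a nonempty accumulator may be
-- committed to the numbers list up front.
theorem aLoop_flush (r c : Int) (y : String) (t : List String) (arow : List Int)
    (cnum : List Char) (ns : List Int) (syms : List (Int × Int))
    (hy : PySem.Str.strIsdigit y = false) (hc : cnum ≠ []) :
    aLoop r (y :: t) c arow cnum ns syms =
      aLoop r (y :: t) c arow [] (ns ++ [(PySem.Int.ofChars? cnum).getD 0]) syms := by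
  have hy' : PySem.Chars.strIsdigit y.toList = false := by
    rw [← PySem.Str.strIsdigit_eq]; exact hy
  simp [aLoop, hy', hc]

-- The main inner-loop equivalence: A over row + ['.'] with empty accumulator
-- equals B's run-splitting loop over the row.
theorem inner_eq (n : Nat) : ∀ (cells : List String), cells.length ≤ n →
    ∀ (r c : Int) (arow : List Int) (ns : List Int) (syms : List (Int × Int)),
    aLoop r (cells ++ ["."]) c arow [] ns syms = bLoop r cells c arow ns syms := by
  induction n with
  | zero =>
    intro cells hlen r c arow ns syms
    have : cells = [] := List.eq_nil_of_length_eq_zero (Nat.le_zero.mp hlen)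
    subst this
    simp [aLoop, bLoop, show PySem.Chars.strIsdigit ['.'] = false from by decide]
  | succ m ih =>
    intro cells hlen r c arow ns syms
    match hcells : cells with
    | [] => simp [aLoop, bLoop, show PySem.Chars.strIsdigit ['.'] = false from by decide]
    | x :: t =>
      by_cases hx : PySem.Str.strIsdigit x = true
      · -- digit run
        rw [bLoop, dif_pos hx]
        generalize hR : List.takeWhile (fun y => PySem.Str.strIsdigit y) (x :: t) = run
        generalize hD : List.dropWhile (fun y => PySem.Str.strIsdigit y) (x :: t) = rest
        have hsplit : run ++ rest = x :: t := by
          rw [← hR, ← hD]; exact List.takeWhile_append_dropWhile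
        have hrun : ∀ y ∈ run, PySem.Str.strIsdigit y = true := by
          intro y hy; rw [← hR] at hy; exact List.mem_takeWhile_imp hy
        have hrunne : run ≠ [] := by
          rw [← hR, List.takeWhile_cons_of_pos hx]; simp
        have h1 : 0 < run.length := List.length_pos_of_ne_nil hrunne
        have hlen2 : run.length + rest.length = t.length + 1 := by
          have := congrArg List.length hsplit; simpa using this
        have hflat : (run.map String.toList).flatten ≠ [] := by
          obtain ⟨z, zs, hrv⟩ := List.exists_cons_of_ne_nil hrunne
          have hz := hrun z (by rw [hrv]; simp)
          rw [hrv]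
          simp only [List.map_cons, List.flatten_cons]
          intro habs
          exact strIsdigit_toList_ne_nil hz (List.append_eq_nil_iff.mp habs).1
        have hjoin : (PySem.Int.ofStr? (PySem.Str.join "" run)).getD 0 =
            (PySem.Int.ofChars? ((run.map String.toList).flatten)).getD 0 := by
          simp only [PySem.Int.ofStr?, PySem.Str.toList_join]
          rw [show ("" : String).toList = [] from rfl, join_nil_eq_flatten]
        conv_lhs => rw [← hsplit]
        rw [List.append_assoc, aLoop_digit_run run hrun]
        simp only [List.nil_append]
        rw [hjoin]
        match hrest : rest with
        | [] =>
          rw [List.nil_append,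
              aLoop_flush r (c + run.length) "." [] _ _ ns syms (by decide) hflat]
          have := ih [] (by simp) r (c + run.length)
            (arow ++ List.replicate run.length (ns.length : Int))
            (ns ++ [(PySem.Int.ofChars? ((run.map String.toList).flatten)).getD 0]) syms
          simpa using this
        | z :: zs =>
          have hz : PySem.Str.strIsdigit z = false := by
            have := head_dropWhile_false _ (x :: t) hD
            simpa using this
          rw [List.cons_append,
              aLoop_flush r (c + run.length) z (zs ++ ["."]) _ _ ns syms hz hflat,
              ← List.cons_append]
          exact ih (z :: zs)
            (by simp at hlen hlen2 ⊢; omega)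
            r (c + run.length) _ _ _
      · -- non-digit run
        have hxf : PySem.Chars.strIsdigit x.toList = false := by
          rw [← PySem.Str.strIsdigit_eq]; simpa using hx
        rw [bLoop, dif_neg hx]
        generalize hR : List.takeWhile (fun y => !PySem.Str.strIsdigit y) (x :: t) = run
        generalize hD : List.dropWhile (fun y => !PySem.Str.strIsdigit y) (x :: t) = rest
        have hsplit : run ++ rest = x :: t := by
          rw [← hR, ← hD]; exact List.takeWhile_append_dropWhile
        have hrun : ∀ y ∈ run, PySem.Str.strIsdigit y = false := by
          intro y hy; rw [← hR] at hy
          have := List.mem_takeWhile_imp hy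
          simpa using this
        have hrunne : run ≠ [] := by
          rw [← hR, List.takeWhile_cons_of_pos (by simp [hxf])]; simp
        have h1 : 0 < run.length := List.length_pos_of_ne_nil hrunne
        have hlen2 : run.length + rest.length = t.length + 1 := by
          have := congrArg List.length hsplit; simpa using this
        conv_lhs => rw [← hsplit]
        rw [List.append_assoc, aLoop_nondigit_run run hrun]
        exact ih rest (by simp at hlen hlen2; omega) r (c + run.length) _ _ _

theorem rows_eq (rows : List (List String)) :
    ∀ (r : Int) (ann : List (List Int)) (ns : List Int) (syms : List (Int × Int)),
    aRows r rows ann ns syms = bRows r rows ann ns syms := by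
  induction rows with
  | nil => intro r ann ns syms; rfl
  | cons row rest ih =>
    intro r ann ns syms
    rw [aRows, bRows, inner_eq row.length row le_rfl]
    exact ih (r + 1) _ _ _

-- ===== VERDICT (by name: the statement is the Claim_ definition above) =====
theorem annotate_grid_spec : Claim_equal_annotate_grid := by
  intro grid _
  unfold Spec_annotate_grid annotate_grid annotate_grid_alt
  exact rows_eq grid 0 [] [] []
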